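-- pv_equiv track=rewrite | github.com/bytebrainai/bytebrain | bytebrain-server/dev/sample_text_splitter.py | create_dict_of_sources
-- ===== SOURCE A (Python) =====
-- from typing import Optional, List, Dict, Any, Tuple
--
-- def create_dict_of_sources(ids: List[str]) -> Dict[str, List[str]]:
--     snippets: Dict[str, List[str]] = {}
--
--     for id in ids:
--         parts = id.rsplit(':', 1)
--         file_path = parts[0]
--         hash_value = parts[1]
--
--         if file_path in snippets:
--             snippets[file_path].append(hash_value)
--         else:
--             snippets[file_path] = [hash_value]
--
--     return snippets
-- ===== SOURCE B (Python) =====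
-- def create_dict_of_sources(ids):
--     pairs = []
--     for id in ids:
--         parts = id.rsplit(':', 1)
--         pairs.append((parts[0], parts[1]))
--     keys = list(dict.fromkeys(p for p, _ in pairs))
--     return {k: [h for p, h in pairs if p == k] for k in keys}
-- ===== Notes on version B (the rewrite author's own statement) =====
-- stated objective: alternative
-- what changed: B replaces A's incremental dict-with-append single pass by a two-phase decomposition: it first materialises the (file_path, hash) pairs, then dedups the file_paths in first-occurrence order and builds each group with a per-key gathering comprehension.
import Mathlib
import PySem

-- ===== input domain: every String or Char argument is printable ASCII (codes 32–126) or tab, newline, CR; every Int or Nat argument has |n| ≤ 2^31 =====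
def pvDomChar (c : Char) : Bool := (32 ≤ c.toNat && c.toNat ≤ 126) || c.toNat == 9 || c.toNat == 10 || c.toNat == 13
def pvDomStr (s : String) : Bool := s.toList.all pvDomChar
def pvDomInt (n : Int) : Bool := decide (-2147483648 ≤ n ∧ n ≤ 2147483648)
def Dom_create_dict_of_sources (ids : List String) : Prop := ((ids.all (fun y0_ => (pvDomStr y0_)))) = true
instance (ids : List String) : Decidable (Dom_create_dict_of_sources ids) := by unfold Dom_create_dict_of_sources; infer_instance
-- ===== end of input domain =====

-- B builds the (file_path, hash) pairs first, then groups per distinct file_path;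
-- an alternative decomposition with the same return value as A.

-- shared helper: Python's s.rsplit(':', 1) (hand port, exact: splits at the
-- highest ':' found by PySem.Str.rfind; returns [s] when there is no ':')
def pvRsplitColon1 (s : String) : List String :=
  let i := PySem.Str.rfind s ":"
  if i < 0 then [s]
  else [String.ofList (s.toList.take i.toNat), String.ofList (s.toList.drop (i.toNat + 1))]

-- ===== PORT A =====
def create_dict_of_sources (ids : List String) : List (String × List String) :=
  (ids.foldl (fun (snippets : PySem.Dict String (List String)) id =>
    let parts := pvRsplitColon1 id
    -- parts[0] / parts[1]: the IndexError case (no ':') is excluded by Pre_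
    let file_path := (PySem.List.pyGet? parts 0).getD ""
    let hash_value := (PySem.List.pyGet? parts 1).getD ""
    if snippets.contains file_path then
      snippets.modify file_path [] (fun l => l ++ [hash_value])
    else
      snippets.insert file_path [hash_value]) PySem.Dict.empty).items

-- ===== PORT B =====
def create_dict_of_sources_alt (ids : List String) : List (String × List String) :=
  let pairs := ids.map (fun id =>
    let parts := pvRsplitColon1 id
    ((PySem.List.pyGet? parts 0).getD "", (PySem.List.pyGet? parts 1).getD ""))
  let keys := PySem.List.dedup (pairs.map (·.1))
  keys.map (fun k => (k, (pairs.filter (fun p => p.1 == k)).map (·.2)))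

-- ===== PRECONDITION & SPEC =====
-- Pre_: every id contains a ':' — on an id with no ':' the Python A (and B)
-- raises IndexError at parts[1].
def Pre_create_dict_of_sources (ids : List String) : Prop :=
  ∀ id ∈ ids, ':' ∈ id.toList
instance (ids : List String) : Decidable (Pre_create_dict_of_sources ids) := by
  unfold Pre_create_dict_of_sources; infer_instance

def pvWitness_create_dict_of_sources : List String := ["a.py:h1", "b.py:h2", "a.py:h3"]

def Spec_create_dict_of_sources (ids : List String) (out : List (String × List String)) : Prop := out = create_dict_of_sources_alt ids
instance (ids : List String) (out : List (String × List String)) : Decidable (Spec_create_dict_of_sources ids out) := by unfold Spec_create_dict_of_sources; infer_instance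

-- ===== CLAIM =====
def Claim_equal_create_dict_of_sources : Prop := ∀ (ids : List String), Dom_create_dict_of_sources ids → Pre_create_dict_of_sources ids → Spec_create_dict_of_sources ids (create_dict_of_sources ids)

-- ===== LEMMAS AND PROOFS =====

-- the (file_path, hash_value) pair both programs compute from one id
def pvPairOf (id : String) : String × String :=
  let parts := pvRsplitColon1 id
  ((PySem.List.pyGet? parts 0).getD "", (PySem.List.pyGet? parts 1).getD "")

-- A's branch is a 'modify with append' in both cases
theorem pv_step_eq (d : PySem.Dict String (List String)) (k : String) (v : String) :
    (if d.contains k then d.modify k [] (fun l => l ++ [v]) else d.insert k [v])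
      = d.modify k [] (fun l => l ++ [v]) := by
  split_ifs with h
  · rfl
  · have h2 : d.get? k = none := by
      rw [PySem.Dict.get?_eq_none_iff_contains]; simpa using h
    simp [PySem.Dict.modify, PySem.Dict.getD, h2]

theorem create_dict_of_sources_eq_alt (ids : List String) :
    create_dict_of_sources ids = create_dict_of_sources_alt ids := by
  show (ids.foldl (fun (snippets : PySem.Dict String (List String)) id =>
      let p := pvPairOf id
      if snippets.contains p.1 then
        snippets.modify p.1 [] (fun l => l ++ [p.2])
      else
        snippets.insert p.1 [p.2]) PySem.Dict.empty).items
    = (let pairs := ids.map pvPairOf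
       let keys := PySem.List.dedup (pairs.map (·.1))
       keys.map (fun k => (k, (pairs.filter (fun p => p.1 == k)).map (·.2))))
  have hfold : (ids.foldl (fun (snippets : PySem.Dict String (List String)) id =>
      let p := pvPairOf id
      if snippets.contains p.1 then
        snippets.modify p.1 [] (fun l => l ++ [p.2])
      else
        snippets.insert p.1 [p.2]) PySem.Dict.empty)
      = (ids.map pvPairOf).foldl
          (fun (d : PySem.Dict String (List String)) p => d.modify p.1 [] (fun l => l ++ [p.2]))
          PySem.Dict.empty := by
    rw [List.foldl_map]
    congr 1
    funext d id
    exact pv_step_eq d (pvPairOf id).1 (pvPairOf id).2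
  rw [hfold]
  set l := ids.map pvPairOf with hl
  set D := l.foldl (fun (d : PySem.Dict String (List String)) p => d.modify p.1 [] (fun l => l ++ [p.2])) PySem.Dict.empty with hD
  have hn : D.keys.Nodup := by
    rw [hD]
    exact PySem.Dict.nodup_keys_foldl_modify_key l Prod.fst [] (fun d p => (fun l => l ++ [p.2])) PySem.Dict.empty (by simp)
  have hkeys : D.keys = PySem.List.dedup (l.map (·.1)) := by
    rw [hD, PySem.Dict.keys_foldl_modify_key]
    simp [PySem.Set.update, PySem.Set.ofList_eq_foldl]
  have hget : ∀ k, D.getD k [] = (l.filter (fun p => p.1 == k)).map (·.2) := by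
    intro k
    rw [hD, PySem.Dict.getD_foldl_modify_append]
    simp
  rw [PySem.Dict.items_eq_map_keys D hn [], hkeys]
  simp only [hget]

-- ===== VERDICT =====
theorem create_dict_of_sources_spec : Claim_equal_create_dict_of_sources := by
  intro ids _ _
  exact create_dict_of_sources_eq_alt ids
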